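/- GENERATED by tools/from_farm_form.py from prooffarm-gif/accepted/DGifGetImageHeader.6/Proof.lean (a worked proof of the farm's unit `DGifGetImageHeader.6`,
   accepted by the verdict) — do not edit. -/
import Gif.Spec.Units.DGifGetImageHeader_6
import Gif.Spec.AllSegs
import Gif.Spec.Proved.DGifGetImageHeader_6_Lemmas

open X86 X86.User Asan ProgX.Base ProgX.Base.Spec Gif.Spec

/-!
  `DGifGetImageHeader.6` (0x108f4e … 0x108f8b, 14 instructions; dgif_lib.c:418-423): `Private->PixelCount = Width * Height` (two checked
  loads of gif, one checked store into the body of pv), `DGifSetupDecompress(gif)` — a call in the middle —, `r13d = eax`, to the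
  epilogue. The call's return address 0x108f83 (`ret16`) is not a cut of the design, so the unit makes it one of its own: a private
  assertion `seg6_AtRet16` (`Body` + the callee's result) and two walks (Lemmas.lean), chained here. The heap `Hc` and the forest `Fc`
  of the assertion do not change; the callee's contract is taken for them and for the frame list with the own frame in front.
-/

/-- Segment 6 of `DGifGetImageHeader` takes `Mid` at 0x108f4e to `Done` at 0x108e78. -/
theorem Gif.Spec.Proved.DGifGetImageHeader_6_ok : Gif.Spec.DGifGetImageHeader_6.Statement := by
  intro Lay hLay μ hμ u₀ hcode h_DGifSetupDecompress h_asan_load4_noabort h_asan_store8_noabort H rest frames F R e ret Hc Fc v hat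
  -- the callee's contract for the PRESENT heap and forest and the frame list of the body (the own frame in front)
  have hsetup := h_DGifSetupDecompress Hc rest (DGifGetImageHeader.framesIn frames e) Fc R
  -- 0x108f4e … the call of DGifSetupDecompress … 0x108f83
  refine (Gif.Spec.DGifGetImageHeader_6.seg6_call Lay hLay μ hμ u₀ hcode H rest frames F R e ret Hc Fc hsetup
    h_asan_load4_noabort h_asan_store8_noabort v hat).trans ?_
  -- 0x108f83 … 0x108e78
  intro v1 hv1
  exact Gif.Spec.DGifGetImageHeader_6.seg6_tail Lay hLay μ hμ u₀ hcode H rest frames F R e ret Hc Fc v1 hv1
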